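-- pv_equiv track=rewrite | github.com/chrismilson/advent-of-code | 2020/day-21/part-1.py | findSafe
-- ===== SOURCE A (Python) =====
-- from collections import Counter
--
-- def findSafe(recipes):
--     """
--     Returns a list of all ingredients that definitely do not contain any
--     allergens, and then a count of how many of those.
--     """
--     allIngredients = Counter()
--     avoid = {}
--
--     for ingredients, allergens in recipes:
--         allIngredients += Counter(ingredients)
--         for allergen in allergens:
--             if allergen not in avoid:
--                 avoid[allergen] = set(ingredients)
--             else:
--                 # Take the intersection with the current possibily dangerous
--                 # ingredients.
--                 avoid[allergen] = set(
--                     ingredient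
--                     for ingredient in ingredients
--                     if ingredient in avoid[allergen]
--                 )
--
--     possiblyDangerous = set(
--         ingredient
--         for allergen in avoid
--         for ingredient in avoid[allergen]
--     )
--
--     definitelySafe = [
--         ingredient
--         for ingredient in allIngredients
--         if ingredient not in possiblyDangerous
--     ]
--
--     return definitelySafe, sum(
--         allIngredients[ingredient]
--         for ingredient in definitelySafe
--     )
-- ===== SOURCE B (Python) =====
-- def findSafe(recipes):
--     """
--     Returns a list of all ingredients that definitely do not contain any
--     allergens, and then a count of how many of those.
--
--     Counting-based: instead of intersecting ingredient sets per allergen,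
--     count for each allergen how many recipes list it, and for each
--     (ingredient, allergen) pair in how many of those recipes the ingredient
--     appears; the ingredient is possibly dangerous for an allergen exactly
--     when the two counts are equal (it appears in every recipe naming the
--     allergen).
--     """
--     counts = {}
--     allergenCount = {}
--     pairCount = {}
--
--     for ingredients, allergens in recipes:
--         for ingredient in ingredients:
--             counts[ingredient] = counts.get(ingredient, 0) + 1
--         uniq = set(ingredients)
--         for allergen in allergens:
--             allergenCount[allergen] = allergenCount.get(allergen, 0) + 1
--             for ingredient in uniq:
--                 key = (ingredient, allergen)
--                 pairCount[key] = pairCount.get(key, 0) + 1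
--
--     possiblyDangerous = {
--         ingredient
--         for (ingredient, allergen), c in pairCount.items()
--         if c == allergenCount[allergen]
--     }
--
--     definitelySafe = [
--         ingredient
--         for ingredient in counts
--         if ingredient not in possiblyDangerous
--     ]
--
--     return definitelySafe, sum(counts[i] for i in definitelySafe)
-- ===== Notes on version B (the rewrite author's own statement) =====
-- stated objective: alternative
-- what changed: B never builds or intersects per-allergen ingredient sets: it counts, per allergen, the number of recipes listing it and, per (ingredient, allergen) pair, the number of such recipes containing the ingredient; an ingredient is possibly dangerous exactly when the two counts coincide for some pair, read off in one pass over pairCount.items().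
import Mathlib
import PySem

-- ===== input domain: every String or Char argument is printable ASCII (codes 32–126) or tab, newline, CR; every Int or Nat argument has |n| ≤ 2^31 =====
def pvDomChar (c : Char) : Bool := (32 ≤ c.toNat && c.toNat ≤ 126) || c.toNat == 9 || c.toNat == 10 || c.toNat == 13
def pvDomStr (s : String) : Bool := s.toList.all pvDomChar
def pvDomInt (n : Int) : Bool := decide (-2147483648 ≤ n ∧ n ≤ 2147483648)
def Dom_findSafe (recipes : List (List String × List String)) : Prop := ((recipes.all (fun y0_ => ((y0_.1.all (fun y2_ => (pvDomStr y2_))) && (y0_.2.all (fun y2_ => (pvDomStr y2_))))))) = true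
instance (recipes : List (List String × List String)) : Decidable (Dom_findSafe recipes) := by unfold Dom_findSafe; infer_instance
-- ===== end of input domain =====

-- B replaces A's per-allergen ingredient-set intersections by pure counting: an ingredient is
-- possibly dangerous iff for some allergen it occurs in every recipe naming that allergen,
-- detected by comparing two counters ("alternative": a different algorithm, no speed claim).

-- ===== PORT A =====
-- 'allIngredients += Counter(ingredients)': Counter.__iadd__ does
-- 'for elem, count in other.items(): self[elem] = count + self[elem]' and then drops
-- non-positive counts — a no-op here since every count is positive, so it is omitted (exact).
def countsStepA (d : PySem.Dict String Int) (ings : List String) : PySem.Dict String Int :=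
  (PySem.Dict.counter ings).items.foldl (fun d p => d.insert p.1 (p.2 + d.getD p.1 0)) d

-- the inner 'for allergen in allergens' loop of A
def avoidStepA (av : PySem.Dict String (PySem.Set String)) (ings : List String)
    (allergens : List String) : PySem.Dict String (PySem.Set String) :=
  allergens.foldl (fun av a =>
    if av.contains a = false then
      av.insert a (PySem.Set.ofList ings)
    else
      av.insert a (PySem.Set.ofList
        (ings.filter (fun i => PySem.Set.contains (av.getD a PySem.Set.empty) i)))) av

def findSafe (recipes : List (List String × List String)) : List String × Int :=
  let st := recipes.foldl
    (fun st r => (countsStepA st.1 r.1, avoidStepA st.2 r.1 r.2))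
    (PySem.Dict.empty, PySem.Dict.empty)
  -- set(ingredient for allergen in avoid for ingredient in avoid[allergen]); the built
  -- value is a set consumed only through membership, so its modelled order is irrelevant
  let possiblyDangerous :=
    st.2.items.foldl (fun s p => PySem.Set.update s p.2) PySem.Set.empty
  let definitelySafe :=
    st.1.keys.filter (fun i => !(PySem.Set.contains possiblyDangerous i))
  (definitelySafe, (definitelySafe.map (fun i => st.1.getD i 0)).sum)

-- ===== PORT B =====
-- 'for ingredient in ingredients: counts[ingredient] = counts.get(ingredient, 0) + 1'
def countsStepB (d : PySem.Dict String Int) (ings : List String) : PySem.Dict String Int :=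
  ings.foldl (fun d x => d.insert x (d.getD x 0 + 1)) d

-- 'for ingredient in uniq: pairCount[key] = pairCount.get(key, 0) + 1'; uniq = set(ingredients)
-- is consumed only through these commuting counter increments, so its iteration order is irrelevant
def pairStepB (pr : PySem.Dict (String × String) Int) (uniq : List String) (a : String) :
    PySem.Dict (String × String) Int :=
  uniq.foldl (fun pr i => pr.insert (i, a) (pr.getD (i, a) 0 + 1)) pr

-- the inner 'for allergen in allergens' loop of B over the state (allergenCount, pairCount)
def allergenStepB (st : PySem.Dict String Int × PySem.Dict (String × String) Int)
    (ings allergens : List String) :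
    PySem.Dict String Int × PySem.Dict (String × String) Int :=
  let uniq := PySem.Set.ofList ings
  allergens.foldl (fun st a =>
    (st.1.insert a (st.1.getD a 0 + 1), pairStepB st.2 uniq a)) st

def findSafe_alt (recipes : List (List String × List String)) : List String × Int :=
  let st := recipes.foldl
    (fun st r => (countsStepB st.1 r.1, allergenStepB st.2 r.1 r.2))
    (PySem.Dict.empty, (PySem.Dict.empty, PySem.Dict.empty))
  -- {ingredient for (ingredient, allergen), c in pairCount.items() if c == allergenCount[allergen]};
  -- 'allergenCount[allergen]' never raises (every pairCount allergen is a key), so getD is exact;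
  -- the value is a set consumed only through membership, so its modelled order is irrelevant
  let possiblyDangerous :=
    st.2.2.items.foldl
      (fun s p => if p.2 == st.2.1.getD p.1.2 0 then PySem.Set.add s p.1.1 else s)
      PySem.Set.empty
  let definitelySafe :=
    st.1.keys.filter (fun i => !(PySem.Set.contains possiblyDangerous i))
  (definitelySafe, (definitelySafe.map (fun i => st.1.getD i 0)).sum)

-- ===== PRECONDITION & SPEC =====
def Spec_findSafe (recipes : List (List String × List String)) (out : List String × Int) : Prop := out = findSafe_alt recipes
instance (recipes : List (List String × List String)) (out : List String × Int) : Decidable (Spec_findSafe recipes out) := by unfold Spec_findSafe; infer_instance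

-- ===== CLAIM (what is proved, stated in full; the proofs are below) =====
def Claim_equal_findSafe : Prop := ∀ (recipes : List (List String × List String)), Dom_findSafe recipes → Spec_findSafe recipes (findSafe recipes)

-- ===== LEMMAS AND PROOFS =====

-- getD after A's fold over a list of (key, count) pairs
theorem getD_foldl_pairs (l : List (String × Int)) (d : PySem.Dict String Int) (k : String) :
    (l.foldl (fun d p => d.insert p.1 (p.2 + d.getD p.1 0)) d).getD k 0
      = d.getD k 0 + ((l.filter (fun p => p.1 = k)).map (·.2)).sum := by
  induction l generalizing d with
  | nil => simp
  | cons p t ih =>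
    simp only [List.foldl_cons, ih, List.filter_cons]
    rw [PySem.Dict.getD_insert]
    rcases eq_or_ne k p.1 with h | h
    · simp [h]; ring
    · simp [h, Ne.symm h]

theorem getD_countsStepA (d : PySem.Dict String Int) (ings : List String) (k : String) :
    (countsStepA d ings).getD k 0 = d.getD k 0 + ings.count k := by
  rw [countsStepA, getD_foldl_pairs, PySem.Dict.items_counter, List.filter_map, List.map_map]
  have hfc : (fun p => decide (p.1 = k)) ∘ (fun k' => ((k' : String), (ings.count k' : Int)))
      = (fun k' => k' == k) := by
    funext k'; by_cases h : k' = k <;> simp [h]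
  rw [hfc, List.filter_beq]
  rw [List.map_replicate, List.sum_replicate]
  by_cases h : k ∈ ings
  · have h1 : List.count k (PySem.Set.ofList ings) = 1 :=
      List.count_eq_one_of_mem (PySem.Set.nodup_ofList ings)
        ((PySem.Set.mem_ofList ings k).mpr h)
    simp [h1]
  · have h0 : List.count k (PySem.Set.ofList ings) = 0 := by
      simp [List.count_eq_zero, PySem.Set.mem_ofList, h]
    simp [h0, List.count_eq_zero_of_not_mem h]

theorem keys_countsStepA (d : PySem.Dict String Int) (ings : List String) :
    (countsStepA d ings).keys = PySem.Set.update d.keys ings := by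
  rw [countsStepA, PySem.Dict.keys_foldl_insert_key]
  have : List.map Prod.fst (PySem.Dict.counter ings).items = PySem.Set.ofList ings := by
    rw [PySem.Dict.items_counter, List.map_map]
    have hid : (Prod.fst ∘ fun k => ((k : String), (List.count k ings : Int))) = fun k => k := by
      funext k; rfl
    rw [hid, List.map_id']
  rw [this, PySem.Set.update_eq_append_filter, PySem.Set.update_eq_append_filter,
    PySem.Set.ofList_ofList]

theorem keys_countsStepB (d : PySem.Dict String Int) (ings : List String) :
    (countsStepB d ings).keys = PySem.Set.update d.keys ings := by
  rw [countsStepB, PySem.Dict.keys_foldl_insert]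

theorem counts_eq (d : PySem.Dict String Int) (hnd : d.keys.Nodup) (ings : List String) :
    countsStepA d ings = countsStepB d ings := by
  have hka := keys_countsStepA d ings
  have hkb := keys_countsStepB d ings
  have hndA : (countsStepA d ings).keys.Nodup := by
    rw [hka]; exact PySem.Set.nodup_update d.keys ings hnd
  have hndB : (countsStepB d ings).keys.Nodup := by
    rw [hkb]; exact PySem.Set.nodup_update d.keys ings hnd
  apply PySem.Dict.ext
  rw [PySem.Dict.items_eq_map_keys _ hndA 0, PySem.Dict.items_eq_map_keys _ hndB 0, hka, hkb]
  apply List.map_congr_left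
  intro k _
  rw [getD_countsStepA, countsStepB, PySem.Dict.getD_foldl_insert_add_one]

-- getD after the pair-counter inner loop
theorem getD_pairStepB (l : List String) (a : String)
    (pr : PySem.Dict (String × String) Int) (x b : String) :
    (pairStepB pr l a).getD (x, b) 0
      = pr.getD (x, b) 0 + (if b = a then (l.count x : Int) else 0) := by
  induction l generalizing pr with
  | nil => simp [pairStepB]
  | cons hd t ih =>
    show (pairStepB (pr.insert (hd, a) (pr.getD (hd, a) 0 + 1)) t a).getD (x, b) 0 = _
    rw [ih, PySem.Dict.getD_insert]
    by_cases hb : b = a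
    · subst hb
      by_cases hx : x = hd
      · subst hx
        rw [if_pos rfl, if_pos rfl, if_pos rfl, List.count_cons_self]
        push_cast
        ring
      · rw [if_neg (by simp [hx]), if_pos rfl, if_pos rfl]
        have hx' : ¬hd = x := fun e => hx e.symm
        simp [hx']
    · rw [if_neg (by simp [hb]), if_neg hb, if_neg hb]

theorem count_ofList_int (ings : List String) (x : String) :
    ((PySem.Set.ofList ings).count x : Int) = if x ∈ ings then 1 else 0 := by
  by_cases h : x ∈ ings
  · rw [List.count_eq_one_of_mem (PySem.Set.nodup_ofList ings)
      ((PySem.Set.mem_ofList ings x).mpr h), if_pos h]; rfl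
  · have h0 : List.count x (PySem.Set.ofList ings) = 0 := by
      simp [List.count_eq_zero, PySem.Set.mem_ofList, h]
    rw [h0, if_neg h]; rfl

theorem nodup_pairStepB (l : List String) (a : String)
    (pr : PySem.Dict (String × String) Int) (h : pr.keys.Nodup) :
    (pairStepB pr l a).keys.Nodup :=
  PySem.Dict.nodup_keys_foldl_insert_key l (fun i => (i, a))
    (fun d i => d.getD (i, a) 0 + 1) pr h

theorem pos_pairStepB (l : List String) (a : String)
    (pr : PySem.Dict (String × String) Int)
    (h : ∀ k ∈ pr.keys, (1 : Int) ≤ pr.getD k 0) :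
    ∀ k ∈ (pairStepB pr l a).keys, (1 : Int) ≤ (pairStepB pr l a).getD k 0 := by
  induction l generalizing pr with
  | nil => exact h
  | cons hd t ih =>
    show ∀ k ∈ (pairStepB (pr.insert (hd, a) (pr.getD (hd, a) 0 + 1)) t a).keys, _
    apply ih
    intro k hk
    rw [PySem.Dict.getD_insert]
    by_cases he : k = (hd, a)
    · rw [if_pos he]
      by_cases hm : (hd, a) ∈ pr.keys
      · have := h _ hm; omega
      · have hc : pr.contains (hd, a) = false := by
          cases hcc : pr.contains (hd, a) with
          | false => rfl
          | true => exact absurd ((PySem.Dict.contains_iff_mem_keys _ _).mp hcc) hm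
        rw [PySem.Dict.getD_of_not_contains _ _ hc]
        omega
    · rw [if_neg he]
      apply h
      rcases (PySem.Dict.mem_keys_insert _ _ _ _).mp hk with he' | hm
      · exact absurd he' he
      · exact hm

-- invariant relating A's avoid to B's two counters
def AvInv (av : PySem.Dict String (PySem.Set String))
    (cnt : PySem.Dict String Int) (pr : PySem.Dict (String × String) Int) : Prop :=
  av.keys = cnt.keys ∧ av.keys.Nodup ∧
  (∀ a x, av.contains a = false → pr.getD (x, a) 0 = 0) ∧
  (∀ a x, pr.getD (x, a) 0 ≤ cnt.getD a 0) ∧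
  (∀ a x, av.contains a = true →
    (x ∈ av.getD a PySem.Set.empty ↔ pr.getD (x, a) 0 = cnt.getD a 0)) ∧
  pr.keys.Nodup ∧
  (∀ k ∈ pr.keys, (1 : Int) ≤ pr.getD k 0) ∧
  (∀ a, av.contains a = true → (1 : Int) ≤ cnt.getD a 0)

theorem avInv_step1 (av : PySem.Dict String (PySem.Set String))
    (cnt : PySem.Dict String Int) (pr : PySem.Dict (String × String) Int)
    (h : AvInv av cnt pr) (ings : List String) (a : String) :
    AvInv
      (if av.contains a = false then
        av.insert a (PySem.Set.ofList ings)
      else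
        av.insert a (PySem.Set.ofList
          (ings.filter (fun i => PySem.Set.contains (av.getD a PySem.Set.empty) i))))
      (cnt.insert a (cnt.getD a 0 + 1))
      (pairStepB pr (PySem.Set.ofList ings) a) := by
  obtain ⟨hkeys, hnd, hzero, hle, hmem, hndpr, hpos, hcpos⟩ := h
  have hcntav : cnt.contains a = av.contains a := by
    rw [PySem.Dict.contains_eq_decide_mem_keys, PySem.Dict.contains_eq_decide_mem_keys, hkeys]
  have hprD : ∀ x b, (pairStepB pr (PySem.Set.ofList ings) a).getD (x, b) 0
      = pr.getD (x, b) 0 + (if b = a then (if x ∈ ings then (1:Int) else 0) else 0) := by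
    intro x b; rw [getD_pairStepB, count_ofList_int]
  have hcntD : ∀ b, (cnt.insert a (cnt.getD a 0 + 1)).getD b 0
      = if b = a then cnt.getD a 0 + 1 else cnt.getD b 0 := fun b => PySem.Dict.getD_insert ..
  have hkcnt : (cnt.insert a (cnt.getD a 0 + 1)).keys
      = if av.contains a = true then cnt.keys else cnt.keys ++ [a] := by
    by_cases hc : av.contains a = true
    · rw [PySem.Dict.keys_insert_of_contains _ _ (hcntav.trans hc), if_pos hc]
    · have : cnt.contains a = false := by rw [hcntav]; simpa using hc
      rw [PySem.Dict.keys_insert_of_not_contains _ _ this, if_neg hc]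
  by_cases hc : av.contains a = true
  · -- allergen seen before: A intersects with set(ingredients)
    rw [if_neg (by simp [hc])]
    have hkins : (av.insert a (PySem.Set.ofList
        (ings.filter (fun i => PySem.Set.contains (av.getD a PySem.Set.empty) i)))).keys
        = av.keys := PySem.Dict.keys_insert_of_contains _ _ hc
    refine ⟨by rw [hkins, hkcnt, if_pos hc, hkeys], by rw [hkins]; exact hnd,
      ?_, ?_, ?_, nodup_pairStepB _ _ _ hndpr, pos_pairStepB _ _ _ hpos, ?_⟩
    · intro b x hb
      have hbav : av.contains b = false := by
        rw [PySem.Dict.contains_eq_decide_mem_keys] at hb ⊢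
        rwa [hkins] at hb
      have hba : b ≠ a := fun e => by rw [e, hc] at hbav; cases hbav
      rw [hprD, if_neg hba, add_zero]
      exact hzero b x hbav
    · intro b x
      rw [hprD, hcntD]
      by_cases hba : b = a
      · rw [if_pos hba, if_pos hba]
        have := hle a x
        subst hba
        split_ifs <;> omega
      · rw [if_neg hba, if_neg hba, add_zero]; exact hle b x
    · intro b x hb
      rw [PySem.Dict.getD_insert, hprD, hcntD]
      by_cases hba : b = a
      · subst hba
        rw [if_pos rfl, if_pos rfl, if_pos rfl, PySem.Set.mem_ofList, List.mem_filter]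
        have hiff := hmem b x hc
        have hlex := hle b x
        constructor
        · rintro ⟨hx, hpx⟩
          have : x ∈ av.getD b PySem.Set.empty :=
            (PySem.Set.contains_iff _ _).mp (by simpa using hpx)
          rw [if_pos hx]
          have := hiff.mp this
          omega
        · intro heq
          by_cases hx : x ∈ ings
          · rw [if_pos hx] at heq
            refine ⟨hx, ?_⟩
            simpa using (PySem.Set.contains_iff _ _).mpr (hiff.mpr (by omega))
          · rw [if_neg hx] at heq; omega
      · rw [if_neg hba, if_neg hba, if_neg hba, add_zero]
        have : av.contains b = true := by
          rw [PySem.Dict.contains_eq_decide_mem_keys] at hb ⊢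
          rwa [hkins] at hb
        exact hmem b x this
    · intro b hb
      rw [hcntD]
      by_cases hba : b = a
      · rw [if_pos hba]
        have := hcpos a hc
        omega
      · rw [if_neg hba]
        rw [PySem.Dict.contains_insert] at hb
        simp only [Bool.or_eq_true, beq_iff_eq] at hb
        exact hcpos b (hb.resolve_left hba)
  · -- new allergen: A stores set(ingredients); B's counters were at zero for a
    have hc' : av.contains a = false := by simpa using hc
    have hcnt' : cnt.contains a = false := by rw [hcntav]; exact hc'
    have hcnt0 : cnt.getD a 0 = 0 := PySem.Dict.getD_of_not_contains _ _ hcnt'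
    rw [if_pos hc']
    have hkins : (av.insert a (PySem.Set.ofList ings)).keys = av.keys ++ [a] :=
      PySem.Dict.keys_insert_of_not_contains _ _ hc'
    have hamem : a ∉ av.keys := fun hm =>
      by rw [(PySem.Dict.contains_iff_mem_keys av a).mpr hm] at hc'; cases hc'
    refine ⟨by rw [hkins, hkcnt, if_neg hc, hkeys], ?_, ?_, ?_, ?_,
      nodup_pairStepB _ _ _ hndpr, pos_pairStepB _ _ _ hpos, ?_⟩
    · rw [hkins, List.nodup_append]
      refine ⟨hnd, List.nodup_singleton a, ?_⟩
      intro y hy z hz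
      rw [List.mem_singleton] at hz
      subst hz
      exact fun h => hamem (h ▸ hy)
    · intro b x hb
      rw [PySem.Dict.contains_insert] at hb
      simp only [Bool.or_eq_false_iff, beq_eq_false_iff_ne, ne_eq] at hb
      rw [hprD, if_neg hb.1, add_zero]
      exact hzero b x hb.2
    · intro b x
      rw [hprD, hcntD]
      by_cases hba : b = a
      · rw [if_pos hba, if_pos hba, hba, hzero a x hc', hcnt0]
        split_ifs <;> omega
      · rw [if_neg hba, if_neg hba, add_zero]; exact hle b x
    · intro b x hb
      rw [PySem.Dict.getD_insert, hprD, hcntD]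
      by_cases hba : b = a
      · subst hba
        rw [if_pos rfl, if_pos rfl, if_pos rfl, hzero b x hc', hcnt0,
          PySem.Set.mem_ofList]
        split_ifs with hx
        · simp [hx]
        · simp [hx]
      · rw [if_neg hba, if_neg hba, if_neg hba, add_zero]
        rw [PySem.Dict.contains_insert] at hb
        simp only [Bool.or_eq_true, beq_iff_eq] at hb
        exact hmem b x (hb.resolve_left hba)
    · intro b hb
      rw [hcntD]
      by_cases hba : b = a
      · rw [if_pos hba, hcnt0]
        omega
      · rw [if_neg hba]
        rw [PySem.Dict.contains_insert] at hb
        simp only [Bool.or_eq_true, beq_iff_eq] at hb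
        exact hcpos b (hb.resolve_left hba)

theorem avInv_step (av : PySem.Dict String (PySem.Set String))
    (cnt : PySem.Dict String Int) (pr : PySem.Dict (String × String) Int)
    (h : AvInv av cnt pr) (ings allergens : List String) :
    AvInv (avoidStepA av ings allergens)
      (allergenStepB (cnt, pr) ings allergens).1
      (allergenStepB (cnt, pr) ings allergens).2 := by
  induction allergens generalizing av cnt pr with
  | nil => exact h
  | cons a t ih =>
    rw [avoidStepA, allergenStepB, List.foldl_cons, List.foldl_cons]
    exact ih _ _ _ (avInv_step1 av cnt pr h ings a)

-- the full loop invariant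
def LoopInv (stA : PySem.Dict String Int × PySem.Dict String (PySem.Set String))
    (stB : PySem.Dict String Int ×
      (PySem.Dict String Int × PySem.Dict (String × String) Int)) : Prop :=
  stA.1 = stB.1 ∧ stA.1.keys.Nodup ∧ AvInv stA.2 stB.2.1 stB.2.2

theorem loop_inv (recipes : List (List String × List String)) :
    ∀ stA stB, LoopInv stA stB →
      LoopInv (recipes.foldl (fun st r => (countsStepA st.1 r.1, avoidStepA st.2 r.1 r.2)) stA)
          (recipes.foldl (fun st r => (countsStepB st.1 r.1, allergenStepB st.2 r.1 r.2)) stB) := by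
  induction recipes with
  | nil => intro _ _ h; exact h
  | cons r t ih =>
    intro stA stB h
    obtain ⟨hc, hnd, hav⟩ := h
    rw [List.foldl_cons, List.foldl_cons]
    refine ih _ _ ⟨?_, ?_, ?_⟩
    · rw [counts_eq _ hnd, hc]
    · rw [counts_eq _ hnd, hc, keys_countsStepB]
      exact PySem.Set.nodup_update _ _ (hc ▸ hnd)
    · exact avInv_step _ _ _ hav r.1 r.2

-- membership in A's possiblyDangerous set
theorem mem_foldl_update (l : List (String × PySem.Set String)) :
    ∀ (s : PySem.Set String) (y : String),
      y ∈ l.foldl (fun s p => PySem.Set.update s p.2) s ↔ y ∈ s ∨ ∃ p ∈ l, y ∈ p.2 := by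
  induction l with
  | nil => simp
  | cons p t ih =>
    intro s y
    rw [List.foldl_cons, ih, PySem.Set.mem_update]
    simp only [List.mem_cons]
    constructor
    · rintro (⟨hy | hy⟩ | ⟨q, hq, hy⟩)
      · exact Or.inl hy
      · exact Or.inr ⟨p, Or.inl rfl, hy⟩
      · exact Or.inr ⟨q, Or.inr hq, hy⟩
    · rintro (hy | ⟨q, hq | hq, hy⟩)
      · exact Or.inl (Or.inl hy)
      · exact Or.inl (Or.inr (hq ▸ hy))
      · exact Or.inr ⟨q, hq, hy⟩

-- membership in B's possiblyDangerous set
theorem mem_foldl_addif (cnt : PySem.Dict String Int)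
    (l : List ((String × String) × Int)) :
    ∀ (s : PySem.Set String) (y : String),
      y ∈ l.foldl (fun s p => if p.2 == cnt.getD p.1.2 0 then PySem.Set.add s p.1.1 else s) s
        ↔ y ∈ s ∨ ∃ p ∈ l, p.2 = cnt.getD p.1.2 0 ∧ y = p.1.1 := by
  induction l with
  | nil => simp
  | cons p t ih =>
    intro s y
    rw [List.foldl_cons]
    by_cases hp : p.2 = cnt.getD p.1.2 0
    · rw [if_pos (by simpa using hp), ih, PySem.Set.mem_add]
      simp only [List.mem_cons]
      constructor
      · rintro (⟨hy | hy⟩ | ⟨q, hq, hv, hy⟩)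
        · exact Or.inl hy
        · exact Or.inr ⟨p, Or.inl rfl, hp, hy⟩
        · exact Or.inr ⟨q, Or.inr hq, hv, hy⟩
      · rintro (hy | ⟨q, hq | hq, hv, hy⟩)
        · exact Or.inl (Or.inl hy)
        · exact Or.inl (Or.inr (by rw [hq] at hy; exact hy))
        · exact Or.inr ⟨q, hq, hv, hy⟩
    · rw [if_neg (by simpa using hp), ih]
      simp only [List.mem_cons]
      constructor
      · rintro (hy | ⟨q, hq, hv, hy⟩)
        · exact Or.inl hy
        · exact Or.inr ⟨q, Or.inr hq, hv, hy⟩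
      · rintro (hy | ⟨q, hq | hq, hv, hy⟩)
        · exact Or.inl hy
        · exact absurd (hq ▸ hv) hp
        · exact Or.inr ⟨q, hq, hv, hy⟩

-- ===== VERDICT (by name: the statement is the Claim_ definition above) =====
theorem findSafe_spec : Claim_equal_findSafe := by
  intro recipes _
  unfold Spec_findSafe findSafe findSafe_alt
  have hinv : LoopInv
      (recipes.foldl (fun st r => (countsStepA st.1 r.1, avoidStepA st.2 r.1 r.2))
        (PySem.Dict.empty, PySem.Dict.empty))
      (recipes.foldl (fun st r => (countsStepB st.1 r.1, allergenStepB st.2 r.1 r.2))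
        (PySem.Dict.empty, (PySem.Dict.empty, PySem.Dict.empty))) := by
    apply loop_inv
    refine ⟨rfl, PySem.Dict.nodup_keys_empty,
      rfl, PySem.Dict.nodup_keys_empty, ?_, ?_, ?_,
      PySem.Dict.nodup_keys_empty, ?_, ?_⟩
    · intro a x _; exact PySem.Dict.getD_empty ..
    · intro a x; rw [PySem.Dict.getD_empty, PySem.Dict.getD_empty]
    · intro a x ha; rw [PySem.Dict.contains_empty] at ha; cases ha
    · intro k hk; simp [PySem.Dict.keys, PySem.Dict.empty] at hk
    · intro a ha; rw [PySem.Dict.contains_empty] at ha; cases ha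
  obtain ⟨hc, hnd, hkeys, hndav, hzero, hle, hmem, hndpr, hpos, hcpos⟩ := hinv
  set stA := recipes.foldl (fun st r => (countsStepA st.1 r.1, avoidStepA st.2 r.1 r.2))
    (PySem.Dict.empty, PySem.Dict.empty) with hstA
  set stB := recipes.foldl (fun st r => (countsStepB st.1 r.1, allergenStepB st.2 r.1 r.2))
    (PySem.Dict.empty, (PySem.Dict.empty, PySem.Dict.empty)) with hstB
  have hcont : (fun i => !(PySem.Set.contains
        (stA.2.items.foldl (fun s p => PySem.Set.update s p.2) PySem.Set.empty) i))
      = (fun i => !(PySem.Set.contains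
        (stB.2.2.items.foldl
          (fun s p => if p.2 == stB.2.1.getD p.1.2 0 then PySem.Set.add s p.1.1 else s)
          PySem.Set.empty) i)) := by
    funext i
    have hAB : PySem.Set.contains
          (stA.2.items.foldl (fun s p => PySem.Set.update s p.2) PySem.Set.empty) i
        = PySem.Set.contains
          (stB.2.2.items.foldl
            (fun s p => if p.2 == stB.2.1.getD p.1.2 0 then PySem.Set.add s p.1.1 else s)
            PySem.Set.empty) i := by
      rw [Bool.eq_iff_iff, PySem.Set.contains_iff, PySem.Set.contains_iff,
        mem_foldl_update, mem_foldl_addif,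
        PySem.Dict.items_eq_map_keys _ hndav PySem.Set.empty,
        PySem.Dict.items_eq_map_keys _ hndpr 0]
      simp only [List.mem_map]
      constructor
      · rintro (hy | ⟨p, ⟨k, hk, rfl⟩, hy⟩)
        · exact absurd hy (by simp [PySem.Set.empty])
        · have hkc : stA.2.contains k = true := (PySem.Dict.contains_iff_mem_keys _ _).mpr hk
          have heq : stB.2.2.getD (i, k) 0 = stB.2.1.getD k 0 := (hmem k i hkc).mp hy
          have h1 : (1 : Int) ≤ stB.2.1.getD k 0 := hcpos k hkc
          have hkpr : (i, k) ∈ stB.2.2.keys := by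
            by_contra hnm
            have h0 : stB.2.2.getD (i, k) 0 = 0 := PySem.Dict.getD_of_not_contains _ _ (by
              cases hcc : stB.2.2.contains (i, k) with
              | false => rfl
              | true => exact absurd ((PySem.Dict.contains_iff_mem_keys _ _).mp hcc) hnm)
            omega
          exact Or.inr ⟨((i, k), stB.2.2.getD (i, k) 0), ⟨(i, k), hkpr, rfl⟩, heq, rfl⟩
      · rintro (hy | ⟨p, ⟨k, hk, rfl⟩, hv, hy⟩)
        · exact absurd hy (by simp [PySem.Set.empty])
        · have h1 : (1 : Int) ≤ stB.2.2.getD k 0 := hpos k hk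
          have hzc : stA.2.contains k.2 = true := by
            by_contra hf
            have hff : stA.2.contains k.2 = false := by
              cases hcc : stA.2.contains k.2 with
              | false => rfl
              | true => exact absurd hcc hf
            have h0 : stB.2.2.getD k 0 = 0 := hzero k.2 k.1 hff
            omega
          have hmemi : k.1 ∈ stA.2.getD k.2 PySem.Set.empty :=
            (hmem k.2 k.1 hzc).mpr hv
          have hk2 : k.2 ∈ stA.2.keys := (PySem.Dict.contains_iff_mem_keys _ _).mp hzc
          refine Or.inr ⟨(k.2, stA.2.getD k.2 PySem.Set.empty), ⟨k.2, hk2, rfl⟩, ?_⟩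
          rw [hy]
          exact hmemi
    rw [hAB]
  simp only [hc, hcont]
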